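-- pv_equiv track=rewrite | github.com/debdattasarkar/DSA | 2. GFG/0. All/4. Dynamic Programming/(M) Maximum sum of elements not part of LIS/py_sol.py | nonLisMaxSum
-- ===== SOURCE A (Python) =====
-- def nonLisMaxSum(arr):
--     # code here
--     n = len(arr)
--
--     # dp[i][0] = minimum sum of LIS ending at i
--     # dp[i][1] = length of LIS ending at i
--     dp = [[0, 0] for _ in range(n)]
--
--     for i in range(n):
--         # Initialize base sum and base length
--         dp[i][0] = arr[i]
--         dp[i][1] = 1
--
--         for j in range(i):
--             if arr[i] > arr[j]:
--                 # same length LIS can be formed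
--                 # choose the one with smaller sum
--                 if dp[j][1] + 1 == dp[i][1]:
--                     dp[i][0] = min(dp[i][0], dp[j][0] + arr[i])
--                 # longer LIS can be formed
--                 # update both length and sum
--                 elif dp[j][1] + 1 > dp[i][1]:
--                     dp[i][0] = dp[j][0] + arr[i]
--                     dp[i][1] = dp[j][1] + 1
--
--     # find maximum LIS length
--     maxLen = max(dp[i][1] for i in range(n))
--
--     # find minimum sum among LIS of maximum length
--     minSum = float('inf')
--     for i in range(n):
--         if dp[i][1] == maxLen:
--             minSum = min(minSum, dp[i][0])
--
--     total = sum(arr)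
--
--     return total - minSum
-- ===== SOURCE B (Python) =====
-- def _combine(a, b):
--     # (length, sum) semilattice: longer LIS wins, on equal length the smaller sum
--     if a[0] > b[0]:
--         return a
--     if b[0] > a[0]:
--         return b
--     return (a[0], min(a[1], b[1]))
--
--
-- def _size(t):
--     return 1 if t[0] == 'L' else t[1]
--
--
-- def _make(sz):
--     # segment tree over sz leaves; leaf = ['L', value], node = ['N', size, agg, left, right]
--     if sz == 1:
--         return ['L', (0, 0)]
--     half = sz // 2
--     return ['N', sz, (0, 0), _make(half), _make(sz - half)]
--
--
-- def _query(t, r):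
--     # combine of leaves [0, r)
--     if r <= 0:
--         return (0, 0)
--     if t[0] == 'L':
--         return t[1]
--     if r >= t[1]:
--         return t[2]
--     k = _size(t[3])
--     if r <= k:
--         return _query(t[3], r)
--     return _combine(_query(t[3], k), _query(t[4], r - k))
--
--
-- def _update(t, i, x):
--     # combine x into leaf i (and into every aggregate on the path)
--     if t[0] == 'L':
--         t[1] = _combine(t[1], x)
--         return
--     t[2] = _combine(t[2], x)
--     if i < _size(t[3]):
--         _update(t[3], i, x)
--     else:
--         _update(t[4], i - _size(t[3]), x)
--
--
-- def nonLisMaxSum(arr):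
--     if not arr:
--         return 0
--     vals = sorted(set(arr))
--     rank = {v: i for i, v in enumerate(vals)}
--     tree = _make(len(vals))
--     best = (0, 0)
--     total = 0
--     for x in arr:
--         total += x
--         r = rank[x]
--         l, s = _query(tree, r)
--         cur = (l + 1, s + x)
--         _update(tree, r, cur)
--         best = _combine(best, cur)
--     return total - best[1]
-- ===== Notes on version B (the rewrite author's own statement) =====
-- stated objective: faster
-- what changed: Replaces the quadratic per-index scan over all previous elements with a segment tree over the coordinate-compressed values storing (LIS length, min sum) aggregates, so each element does one prefix query and one point update.
import Mathlib
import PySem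

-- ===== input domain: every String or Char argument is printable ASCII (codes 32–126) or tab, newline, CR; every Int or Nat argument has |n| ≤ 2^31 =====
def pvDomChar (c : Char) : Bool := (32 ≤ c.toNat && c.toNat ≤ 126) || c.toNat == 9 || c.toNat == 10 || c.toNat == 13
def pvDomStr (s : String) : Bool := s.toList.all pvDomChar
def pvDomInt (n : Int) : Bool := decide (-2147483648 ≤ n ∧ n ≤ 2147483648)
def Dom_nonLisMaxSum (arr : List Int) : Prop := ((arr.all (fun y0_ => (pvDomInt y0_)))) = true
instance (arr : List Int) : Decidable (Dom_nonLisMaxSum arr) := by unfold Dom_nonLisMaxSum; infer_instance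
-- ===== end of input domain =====

-- B is a different algorithm: a segment tree over the coordinate-compressed values (prefix query +
-- point update of (LIS-length, min-sum) aggregates) instead of A's quadratic scan over all previous
-- elements; equivalence is proved on non-empty lists (A raises ValueError on []).

-- ===== PORT A =====
-- A's inner 'for j in range(i)' loop body: cur is dp[i] = (sum, len), p is (arr[j], dp[j][0], dp[j][1])
def stepA (x : Int) (cur : Int × Int) (p : Int × Int × Int) : Int × Int :=
  if x > p.1 then
    if p.2.2 + 1 = cur.2 then (min cur.1 (p.2.1 + x), cur.2)
    else if p.2.2 + 1 > cur.2 then (p.2.1 + x, p.2.2 + 1)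
    else cur
  else cur

-- A's outer 'for i in range(n)' loop: the accumulator is the list of (arr[j], dp[j][0], dp[j][1])
-- for the already-finalised j < i (dp[j] is only read for j < i, so this is the same state A keeps)
def dpA (arr : List Int) : List (Int × Int × Int) :=
  arr.foldl (fun acc x => acc ++ [(x, acc.foldl (stepA x) (x, 1))]) []

def nonLisMaxSum (arr : List Int) : Int :=
  let dp := dpA arr
  match PySem.List.max? (dp.map (fun p => p.2.2)) (fun y => y) with
  | none => 0   -- Python: max() of an empty generator raises ValueError; excluded by Pre_
  | some maxLen =>
    -- minSum starts at float('inf'): modelled as none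
    let minSum := dp.foldl (fun (acc : Option Int) p =>
        if p.2.2 = maxLen then
          some (match acc with | none => p.2.1 | some s => min s p.2.1)
        else acc) none
    match minSum with
    | none => 0   -- unreachable: some dp entry attains maxLen
    | some s => arr.sum - s

-- ===== PORT B =====
def combine (a b : Int × Int) : Int × Int :=
  if a.1 > b.1 then a else if b.1 > a.1 then b else (a.1, min a.2 b.2)

-- segment tree: leaf value, or node (size, aggregate, left, right)
inductive Seg where
  | leaf : Int × Int → Seg
  | node : Nat → (Int × Int) → Seg → Seg → Seg
deriving Repr, DecidableEq

def segSize : Seg → Nat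
  | .leaf _ => 1
  | .node sz _ _ _ => sz

def mkSeg : Nat → Seg
  | 0 => .leaf (0, 0)   -- Source B never builds an empty tree (it returns 0 on [] first)
  | 1 => .leaf (0, 0)
  | (n+2) => .node (n+2) (0, 0) (mkSeg ((n+2)/2)) (mkSeg ((n+2) - (n+2)/2))
decreasing_by all_goals omega

-- combine of leaves [0, r)
def qSeg (t : Seg) (r : Nat) : Int × Int :=
  if r = 0 then (0, 0)
  else match t with
  | .leaf v => v
  | .node sz ag l rt =>
    if sz ≤ r then ag
    else
      let k := segSize l
      if r ≤ k then qSeg l r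
      else combine (qSeg l k) (qSeg rt (r - k))

-- combine x into leaf i and into every aggregate on the path
def uSeg (t : Seg) (i : Nat) (x : Int × Int) : Seg :=
  match t with
  | .leaf v => .leaf (combine v x)
  | .node sz ag l rt =>
    let k := segSize l
    if i < k then .node sz (combine ag x) (uSeg l i x) rt
    else .node sz (combine ag x) l (uSeg rt (i - k) x)

def nonLisMaxSum_alt (arr : List Int) : Int :=
  if arr = [] then 0
  else
    let vals := PySem.List.sorted (PySem.Set.ofList arr) (fun v => v) false
    let rank : PySem.Dict Int Int :=
      (PySem.List.enumerate vals 0).foldl (fun d p => d.insert p.2 p.1) PySem.Dict.empty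
    let res := arr.foldl (fun (st : Seg × (Int × Int) × Int) x =>
        let r := ((rank.get? x).getD 0).toNat   -- rank[x]; always present and ≥ 0, so toNat is exact
        let q := qSeg st.1 r
        let cur := (q.1 + 1, q.2 + x)
        (uSeg st.1 r cur, combine st.2.1 cur, st.2.2 + x))
      (mkSeg vals.length, (0, 0), 0)
    res.2.2 - res.2.1.2

-- ===== PRECONDITION & SPEC =====
-- Pre_ excludes only the empty list, on which A raises ValueError (max() of an empty generator).
def Pre_nonLisMaxSum (arr : List Int) : Prop := arr ≠ []
instance (arr : List Int) : Decidable (Pre_nonLisMaxSum arr) := by unfold Pre_nonLisMaxSum; infer_instance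

def pvWitness_nonLisMaxSum : List Int := [3, 1, 2]

def Spec_nonLisMaxSum (arr : List Int) (out : Int) : Prop := out = nonLisMaxSum_alt arr
instance (arr : List Int) (out : Int) : Decidable (Spec_nonLisMaxSum arr out) := by unfold Spec_nonLisMaxSum; infer_instance

-- ===== CLAIM (what is proved, stated in full; the proofs are below) =====
def Claim_equal_nonLisMaxSum : Prop := ∀ (arr : List Int), Dom_nonLisMaxSum arr → Pre_nonLisMaxSum arr → Spec_nonLisMaxSum arr (nonLisMaxSum arr)

-- ===== LEMMAS AND PROOFS =====

-- ---- the (length, min-sum) semilattice ----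
-- combine is the min of the total order "longer length first, then smaller sum", hence
-- commutative and associative; (0,0) is a unit on "good" values (the unit itself and
-- real entries, whose length component is ≥ 1)
def goodP (p : Int × Int) : Prop := p = (0, 0) ∨ 1 ≤ p.1

def agg (l : List (Int × Int)) : Int × Int := l.foldl combine (0, 0)

lemma combine_comm (a b : Int × Int) : combine a b = combine b a := by
  rcases a with ⟨a1, a2⟩; rcases b with ⟨b1, b2⟩
  unfold combine; dsimp only; split_ifs <;> simp_all [Prod.ext_iff] <;> omega

lemma combine_assoc (a b c : Int × Int) :
    combine (combine a b) c = combine a (combine b c) := by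
  rcases a with ⟨a1, a2⟩; rcases b with ⟨b1, b2⟩; rcases c with ⟨c1, c2⟩
  unfold combine; dsimp only; split_ifs <;> simp_all [Prod.ext_iff] <;> omega

lemma combine_fst (a b : Int × Int) : (combine a b).1 = max a.1 b.1 := by
  unfold combine; split_ifs <;> (simp; omega)

lemma good_combine {a b : Int × Int} (ha : goodP a) (hb : goodP b) : goodP (combine a b) := by
  rcases a with ⟨a1, a2⟩; rcases b with ⟨b1, b2⟩
  unfold goodP combine at *; dsimp only at *; split_ifs <;> simp_all [Prod.ext_iff] <;> omega

lemma combine_idl {b : Int × Int} (hb : goodP b) : combine (0, 0) b = b := by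
  rcases b with ⟨b1, b2⟩
  unfold goodP combine at *; dsimp only at *; split_ifs <;> simp_all [Prod.ext_iff] <;> omega

lemma combine_idr {b : Int × Int} (hb : goodP b) : combine b (0, 0) = b := by
  rw [combine_comm]; exact combine_idl hb

lemma foldl_combine_good : ∀ (l : List (Int × Int)) (b : Int × Int),
    goodP b → (∀ p ∈ l, goodP p) → goodP (l.foldl combine b) := by
  intro l
  induction l with
  | nil => intro b hb _; exact hb
  | cons p t ih =>
    intro b hb hl
    exact ih _ (good_combine hb (hl p (by simp))) (fun q hq => hl q (by simp [hq]))

lemma agg_good {l : List (Int × Int)} (hl : ∀ p ∈ l, goodP p) : goodP (agg l) :=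
  foldl_combine_good l (0, 0) (Or.inl rfl) hl

lemma foldl_combine_shift : ∀ (l : List (Int × Int)) (b : Int × Int),
    (∀ p ∈ l, goodP p) → goodP b → l.foldl combine b = combine b (agg l) := by
  intro l
  induction l with
  | nil => intro b _ hb; exact (combine_idr hb).symm
  | cons p t ih =>
    intro b hl hb
    have hp : goodP p := hl p (by simp)
    have ht : ∀ q ∈ t, goodP q := fun q hq => hl q (by simp [hq])
    have h1 : (p :: t).foldl combine b = combine (combine b p) (agg t) := by
      simpa using ih (combine b p) ht (good_combine hb hp)
    have h2 : agg (p :: t) = combine p (agg t) := by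
      have h3 : agg (p :: t) = t.foldl combine (combine (0, 0) p) := by simp [agg]
      rw [h3, combine_idl hp, ih p ht hp]
    rw [h1, h2, combine_assoc]

lemma agg_append {l1 l2 : List (Int × Int)} (h1 : ∀ p ∈ l1, goodP p)
    (h2 : ∀ p ∈ l2, goodP p) : agg (l1 ++ l2) = combine (agg l1) (agg l2) := by
  unfold agg
  rw [List.foldl_append]
  exact foldl_combine_shift l2 _ h2 (agg_good h1)

lemma agg_append_singleton (l : List (Int × Int)) (p : Int × Int) :
    agg (l ++ [p]) = combine (agg l) p := by
  simp [agg, List.foldl_append]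

lemma agg_perm {l1 l2 : List (Int × Int)} (h : l1.Perm l2) : agg l1 = agg l2 :=
  @List.Perm.foldl_eq _ _ combine _ _
    ⟨fun b a a' => by rw [combine_assoc, combine_assoc, combine_comm a a']⟩ h (0, 0)

lemma agg_replicate : ∀ n, agg (List.replicate n ((0 : Int), (0 : Int))) = (0, 0) := by
  intro n
  induction n with
  | zero => rfl
  | succ k ih =>
    have h : agg (List.replicate (k + 1) ((0 : Int), (0 : Int)))
        = (List.replicate k ((0 : Int), (0 : Int))).foldl combine (combine (0, 0) (0, 0)) := by
      simp [agg, List.replicate_succ]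
    rw [h]
    have hc : combine ((0 : Int), (0 : Int)) (0, 0) = (0, 0) := by decide
    rw [hc]; exact ih

lemma agg_maps_flatten : ∀ (ls : List (List (Int × Int))),
    (∀ l ∈ ls, ∀ p ∈ l, goodP p) →
    agg (ls.map agg) = agg ls.flatten := by
  intro ls
  induction ls with
  | nil => intro _; rfl
  | cons l t ih =>
    intro h
    have hl : ∀ p ∈ l, goodP p := h l (by simp)
    have ht : ∀ l' ∈ t, ∀ p ∈ l', goodP p := fun l' hl' => h l' (by simp [hl'])
    have htg : ∀ p ∈ t.flatten, goodP p := by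
      intro p hp
      rcases List.mem_flatten.mp hp with ⟨l', hl', hp'⟩
      exact ht l' hl' p hp'
    have h2 : ∀ p ∈ t.map agg, goodP p := by
      intro p hp
      rcases List.mem_map.mp hp with ⟨l', hl', rfl⟩
      exact agg_good (ht l' hl')
    calc agg ((l :: t).map agg)
        = (t.map agg).foldl combine (combine (0, 0) (agg l)) := by simp [agg]
      _ = (t.map agg).foldl combine (agg l) := by rw [combine_idl (agg_good hl)]
      _ = combine (agg l) (agg (t.map agg)) := foldl_combine_shift _ _ h2 (agg_good hl)
      _ = combine (agg l) (agg t.flatten) := by rw [ih ht]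
      _ = agg (l ++ t.flatten) := (agg_append hl htg).symm
      _ = agg (l :: t).flatten := by simp

-- ---- the common specification: per-element (LIS length, min LIS sum) pairs ----
def cstep (x : Int) (b : Int × Int) (t : Int × Int × Int) : Int × Int :=
  if t.1 < x then combine b t.2 else b

def bSpec (x : Int) (acc : List (Int × Int × Int)) : Int × Int :=
  ((acc.foldl (cstep x) (0, 0)).1 + 1, (acc.foldl (cstep x) (0, 0)).2 + x)

def buildSpec (arr : List Int) : List (Int × Int × Int) :=
  arr.foldl (fun acc x => acc ++ [(x, bSpec x acc)]) []

lemma buildSpec_append (p : List Int) (x : Int) :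
    buildSpec (p ++ [x]) = buildSpec p ++ [(x, bSpec x (buildSpec p))] := by
  simp [buildSpec, List.foldl_append]

lemma buildSpec_fst (p : List Int) : (buildSpec p).map (·.1) = p := by
  induction p using List.reverseRecOn with
  | nil => rfl
  | append_singleton l x ih => rw [buildSpec_append]; simp [ih]

lemma cstep_fold (x : Int) (l : List (Int × Int × Int)) (b : Int × Int) :
    l.foldl (cstep x) b
      = ((l.filter (fun t => decide (t.1 < x))).map (·.2)).foldl combine b := by
  rw [List.foldl_map, List.foldl_filter]
  simp only [decide_eq_true_eq]
  rfl

lemma buildSpec_good : ∀ (p : List Int), ∀ t ∈ buildSpec p, 1 ≤ t.2.1 := by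
  intro p
  induction p using List.reverseRecOn with
  | nil => intro t ht; simp [buildSpec] at ht
  | append_singleton l x ih =>
    intro t ht
    rw [buildSpec_append] at ht
    rcases List.mem_append.mp ht with h | h
    · exact ih t h
    · have ht' : t = (x, bSpec x (buildSpec l)) := by simpa using h
      subst ht'
      have hg : goodP ((buildSpec l).foldl (cstep x) (0, 0)) := by
        rw [cstep_fold]
        apply foldl_combine_good _ _ (Or.inl rfl)
        intro q hq
        rcases List.mem_map.mp hq with ⟨s, hs, rfl⟩
        exact Or.inr (ih s (List.mem_of_mem_filter hs))
      rcases hg with hg | hg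
      · simp [bSpec, hg]
      · simp only [bSpec]; omega

-- ---- port A computes the specification ----
def conv3 (t : Int × Int × Int) : Int × Int × Int := (t.1, t.2.2, t.2.1)

lemma stepA_hom (x : Int) (b : Int × Int) (s : Int × Int × Int) :
    stepA x (b.2 + x, b.1 + 1) (conv3 s)
      = ((cstep x b s).2 + x, (cstep x b s).1 + 1) := by
  rcases b with ⟨b1, b2⟩; rcases s with ⟨v, l, sm⟩
  unfold stepA cstep conv3 combine
  dsimp only
  split_ifs <;> simp_all [Prod.ext_iff] <;> omega

lemma foldA (x : Int) : ∀ (l : List (Int × Int × Int)) (b : Int × Int),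
    (l.map conv3).foldl (stepA x) (b.2 + x, b.1 + 1)
      = ((l.foldl (cstep x) b).2 + x, (l.foldl (cstep x) b).1 + 1) := by
  intro l
  induction l with
  | nil => intro b; rfl
  | cons s t ih =>
    intro b
    have h : (conv3 s :: t.map conv3).foldl (stepA x) (b.2 + x, b.1 + 1)
        = (t.map conv3).foldl (stepA x) (stepA x (b.2 + x, b.1 + 1) (conv3 s)) := rfl
    simp only [List.map_cons, List.foldl_cons]
    rw [stepA_hom]
    exact ih (cstep x b s)

lemma dpA_eq (arr : List Int) : dpA arr = (buildSpec arr).map conv3 := by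
  suffices h : ∀ (l : List Int) (sp : List (Int × Int × Int)),
      l.foldl (fun acc x => acc ++ [(x, acc.foldl (stepA x) (x, 1))]) (sp.map conv3)
        = (l.foldl (fun acc x => acc ++ [(x, bSpec x acc)]) sp).map conv3 by
    simpa [dpA, buildSpec] using h arr []
  intro l
  induction l with
  | nil => intro sp; rfl
  | cons x t ih =>
    intro sp
    simp only [List.foldl_cons]
    have hx : ((0 : Int) + x, (0 : Int) + 1) = (x, 1) := by norm_num
    have h1 : (sp.map conv3).foldl (stepA x) (x, 1)
        = ((sp.foldl (cstep x) (0, 0)).2 + x, (sp.foldl (cstep x) (0, 0)).1 + 1) := by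
      rw [← hx]
      exact foldA x sp (0, 0)
    have h2 : sp.map conv3 ++ [(x, (sp.map conv3).foldl (stepA x) (x, 1))]
        = (sp ++ [(x, bSpec x sp)]).map conv3 := by
      rw [h1]; simp [conv3, bSpec]
    rw [h2, ih]

-- ---- A's two final passes (max length, then min sum among entries of that length)
--      compute exactly the two components of agg ----
def minAt (l : List (Int × Int)) (M : Int) : Option Int :=
  l.foldl (fun acc p =>
    if p.1 = M then some (match acc with | none => p.2 | some s => min s p.2) else acc) none

lemma minAt_append_singleton (l : List (Int × Int)) (p : Int × Int) (M : Int) :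
    minAt (l ++ [p]) M
      = if p.1 = M then some (match minAt l M with | none => p.2 | some s => min s p.2)
        else minAt l M := by
  simp [minAt, List.foldl_append]

lemma minAt_none {M : Int} : ∀ {l : List (Int × Int)}, (∀ q ∈ l, q.1 ≠ M) → minAt l M = none := by
  suffices h : ∀ (l : List (Int × Int)) (acc : Option Int), (∀ q ∈ l, q.1 ≠ M) →
      l.foldl (fun acc p =>
        if p.1 = M then some (match acc with | none => p.2 | some s => min s p.2) else acc) acc
        = acc by
    intro l hl; exact h l none hl
  intro l
  induction l with
  | nil => intro acc _; rfl
  | cons q t ih =>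
    intro acc hl
    simp only [List.foldl_cons, if_neg (hl q (by simp))]
    exact ih acc (fun r hr => hl r (by simp [hr]))

lemma A_agg : ∀ (l : List (Int × Int)), l ≠ [] → (∀ p ∈ l, 1 ≤ p.1) →
    (∀ q ∈ l, q.1 ≤ (agg l).1) ∧
    PySem.List.max? (l.map (·.1)) (fun y => y) = some ((agg l).1) ∧
    minAt l ((agg l).1) = some ((agg l).2) := by
  intro l
  induction l using List.reverseRecOn with
  | nil => intro h; exact absurd rfl h
  | append_singleton l p ih =>
    intro _ hgood
    have hp1 : 1 ≤ p.1 := hgood p (by simp)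
    have hA : agg (l ++ [p]) = combine (agg l) p := agg_append_singleton l p
    rcases eq_or_ne l [] with rfl | hl
    · refine ⟨?_, ?_, ?_⟩
      · intro q hq
        have hq' : q = p := by simpa using hq
        subst hq'
        simp only [List.nil_append] at hA ⊢
        rw [hA, show agg ([] : List (Int × Int)) = (0, 0) from rfl, combine_idl (Or.inr hp1)]
      · simp only [List.nil_append] at hA ⊢
        rw [hA, show agg ([] : List (Int × Int)) = (0, 0) from rfl, combine_idl (Or.inr hp1)]
        simp [PySem.List.max?]
      · simp only [List.nil_append] at hA ⊢
        rw [hA, show agg ([] : List (Int × Int)) = (0, 0) from rfl, combine_idl (Or.inr hp1)]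
        simp [minAt]
    · obtain ⟨hle, hmax, hmin⟩ := ih hl (fun q hq => hgood q (by simp [hq]))
      have hfst : (agg (l ++ [p])).1 = max (agg l).1 p.1 := by rw [hA, combine_fst]
      have hle' : ∀ q ∈ l ++ [p], q.1 ≤ (agg (l ++ [p])).1 := by
        intro q hq
        rw [hfst]
        rcases List.mem_append.mp hq with h | h
        · exact le_trans (hle q h) (le_max_left _ _)
        · have hq' : q = p := by simpa using h
          subst hq'; exact le_max_right _ _
      refine ⟨hle', ?_, ?_⟩
      · -- max? over the appended list
        obtain ⟨c, t, rfl⟩ := List.exists_cons_of_ne_nil hl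
        have h1 : ((c :: t) ++ [p]).map (·.1) = c.1 :: (t.map (·.1) ++ [p.1]) := by simp
        rw [h1, PySem.List.max?_id_cons]
        have h2 : (c :: t).map (·.1) = c.1 :: t.map (·.1) := by simp
        rw [h2, PySem.List.max?_id_cons] at hmax
        have h3 : (t.map (·.1)).foldl max c.1 = (agg (c :: t)).1 := by
          simpa using hmax
        rw [List.foldl_append, h3]
        simp only [List.foldl_cons, List.foldl_nil, hfst]
      · -- the min-sum pass
        rw [minAt_append_singleton, hfst]
        rcases lt_trichotomy p.1 (agg l).1 with hc | hc | hc
        · rw [if_neg (by omega), max_eq_left (le_of_lt hc)]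
          have : combine (agg l) p = agg l := by
            unfold combine; rw [if_pos hc]
          rw [hA, this]
          exact hmin
        · rw [if_pos (by omega), max_eq_left (le_of_eq hc)]
          have : combine (agg l) p = ((agg l).1, min (agg l).2 p.2) := by
            unfold combine; rw [if_neg (by omega), if_neg (by omega)]
          rw [hA, this, hmin]
        · rw [if_pos (by omega), max_eq_right (le_of_lt hc)]
          have h4 : minAt l p.1 = none := minAt_none (fun q hq => by
            have := hle q hq; omega)
          have : combine (agg l) p = p := by
            unfold combine; rw [if_neg (by omega), if_pos hc]
          rw [hA, this, h4]

-- ---- segment tree correctness ----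
def leavesSeg : Seg → List (Int × Int)
  | .leaf v => [v]
  | .node _ _ l r => leavesSeg l ++ leavesSeg r

def WFSeg : Seg → Prop
  | .leaf v => goodP v
  | .node sz ag l r => sz = (leavesSeg l).length + (leavesSeg r).length ∧
      ag = agg (leavesSeg l ++ leavesSeg r) ∧ WFSeg l ∧ WFSeg r

lemma segSize_eq : ∀ {t : Seg}, WFSeg t → segSize t = (leavesSeg t).length := by
  intro t h
  cases t with
  | leaf v => rfl
  | node sz ag l r => simp [segSize, leavesSeg, h.1]

lemma WF_good : ∀ {t : Seg}, WFSeg t → ∀ v ∈ leavesSeg t, goodP v := by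
  intro t
  induction t with
  | leaf v =>
    intro h w hw
    have hwv : w = v := by simpa [leavesSeg] using hw
    subst hwv; exact h
  | node sz ag l r ihl ihr =>
    intro h w hw
    rcases List.mem_append.mp hw with h' | h'
    · exact ihl h.2.2.1 w h'
    · exact ihr h.2.2.2 w h'

lemma qSeg_eq : ∀ (t : Seg), WFSeg t → ∀ (r : Nat),
    qSeg t r = agg ((leavesSeg t).take r) := by
  intro t
  induction t with
  | leaf v =>
    intro h r
    rcases Nat.eq_zero_or_pos r with rfl | hr
    · rfl
    · have h1 : qSeg (Seg.leaf v) r = v := by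
        unfold qSeg; rw [if_neg (by omega)]
      have h2 : (leavesSeg (Seg.leaf v)).take r = [v] :=
        List.take_of_length_le (by simp [leavesSeg]; omega)
      rw [h1, h2]
      have : agg [v] = combine (0, 0) v := rfl
      rw [this, combine_idl h]
  | node sz ag l rt ihl ihr =>
    intro h r
    obtain ⟨hsz, hag, hl, hr⟩ := h
    have hk : segSize l = (leavesSeg l).length := segSize_eq hl
    rcases Nat.eq_zero_or_pos r with rfl | hrpos
    · rfl
    · show (if r = 0 then (0, 0) else _) = _
      rw [if_neg (by omega)]
      by_cases hbig : sz ≤ r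
      · rw [if_pos hbig]
        have : (leavesSeg (Seg.node sz ag l rt)).take r = leavesSeg l ++ leavesSeg rt := by
          apply List.take_of_length_le
          simp [leavesSeg]; omega
        rw [this, hag]
      · rw [if_neg hbig]
        by_cases hsml : r ≤ segSize l
        · rw [if_pos hsml]
          have : (leavesSeg (Seg.node sz ag l rt)).take r = (leavesSeg l).take r := by
            show (leavesSeg l ++ leavesSeg rt).take r = _
            rw [List.take_append, Nat.sub_eq_zero_of_le (by omega)]
            simp
          rw [this]
          exact ihl hl r
        · rw [if_neg hsml]
          have hgl := WF_good hl
          have hgr := WF_good hr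
          have h1 : (leavesSeg (Seg.node sz ag l rt)).take r
              = leavesSeg l ++ (leavesSeg rt).take (r - segSize l) := by
            show (leavesSeg l ++ leavesSeg rt).take r = _
            rw [List.take_append, List.take_of_length_le (by omega), hk]
          rw [h1, agg_append hgl (fun p hp => hgr p (List.mem_of_mem_take hp))]
          rw [ihl hl (segSize l), ihr hr (r - segSize l)]
          rw [List.take_of_length_le (by omega)]

lemma agg_cons {c : Int × Int} {d : List (Int × Int)} (hc : goodP c)
    (hd : ∀ p ∈ d, goodP p) : agg (c :: d) = combine c (agg d) := by
  have h : agg (c :: d) = d.foldl combine (combine (0, 0) c) := by simp [agg]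
  rw [h, combine_idl hc, foldl_combine_shift d c hd hc]

lemma agg_set (l : List (Int × Int)) (i : Nat) (x : Int × Int) (hi : i < l.length)
    (hg : ∀ p ∈ l, goodP p) (hx : goodP x) :
    agg (l.set i (combine (l.getD i (0, 0)) x)) = combine (agg l) x := by
  have hsplit : l = l.take i ++ l[i] :: l.drop (i + 1) := by
    rw [List.getElem_cons_drop, List.take_append_drop]
  have hset : l.set i (combine (l.getD i (0, 0)) x)
      = l.take i ++ combine (l.getD i (0, 0)) x :: l.drop (i + 1) := by
    rw [List.set_eq_take_append_cons_drop]
    rw [if_pos hi]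
  have hgd : l.getD i (0, 0) = l[i] := List.getD_eq_getElem l (0, 0) hi
  have hgt : ∀ p ∈ l.take i, goodP p := fun p hp => hg p (List.mem_of_mem_take hp)
  have hgd' : ∀ p ∈ l.drop (i + 1), goodP p := fun p hp => hg p (List.mem_of_mem_drop hp)
  have hgi : goodP l[i] := hg _ (List.getElem_mem hi)
  rw [hset, hgd]
  rw [agg_append hgt (fun p hp => by
    rcases List.mem_cons.mp hp with rfl | hp'
    · exact good_combine hgi hx
    · exact hgd' p hp')]
  rw [agg_cons (good_combine hgi hx) hgd']
  conv_rhs => rw [hsplit, agg_append hgt (fun p hp => by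
    rcases List.mem_cons.mp hp with rfl | hp'
    · exact hgi
    · exact hgd' p hp'), agg_cons hgi hgd']
  rw [combine_assoc l[i] x (agg (l.drop (i+1))), combine_comm x (agg (l.drop (i+1))),
      ← combine_assoc l[i] (agg (l.drop (i+1))) x,
      ← combine_assoc (agg (l.take i)) (combine l[i] (agg (l.drop (i+1)))) x]

lemma uSeg_spec : ∀ (t : Seg), WFSeg t → ∀ (i : Nat) (x : Int × Int), goodP x →
    i < (leavesSeg t).length →
    leavesSeg (uSeg t i x) = (leavesSeg t).set i (combine ((leavesSeg t).getD i (0, 0)) x) ∧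
    WFSeg (uSeg t i x) := by
  intro t
  induction t with
  | leaf v =>
    intro h i x hx hi
    have hi0 : i = 0 := by simp [leavesSeg] at hi; omega
    subst hi0
    constructor
    · show [combine v x] = _
      simp [leavesSeg]
    · exact good_combine h hx
  | node sz ag l rt ihl ihr =>
    intro h i x hx hi
    obtain ⟨hsz, hag, hl, hr⟩ := h
    have hk : segSize l = (leavesSeg l).length := segSize_eq hl
    have hgl := WF_good hl
    have hgr := WF_good hr
    have hgall : ∀ p ∈ leavesSeg l ++ leavesSeg rt, goodP p := by
      intro p hp
      rcases List.mem_append.mp hp with h' | h'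
      exacts [hgl p h', hgr p h']
    have hlen : i < (leavesSeg l ++ leavesSeg rt).length := by
      simpa [leavesSeg] using hi
    by_cases hc : i < segSize l
    · have huf : uSeg (Seg.node sz ag l rt) i x
          = Seg.node sz (combine ag x) (uSeg l i x) rt := by
        conv_lhs => rw [uSeg]
        rw [if_pos hc]
      obtain ⟨hlv, hwf⟩ := ihl hl i x hx (by omega)
      have hleaves : leavesSeg (uSeg (Seg.node sz ag l rt) i x)
          = (leavesSeg l ++ leavesSeg rt).set i
              (combine ((leavesSeg l ++ leavesSeg rt).getD i (0, 0)) x) := by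
        rw [huf]
        show leavesSeg (uSeg l i x) ++ leavesSeg rt = _
        rw [List.set_append, if_pos (by omega), hlv]
        congr 2
        rw [List.getD_eq_getElem _ _ (by omega), List.getD_eq_getElem _ _ hlen,
            List.getElem_append_left (by omega)]
      refine ⟨hleaves, ?_⟩
      rw [huf]
      refine ⟨?_, ?_, hwf, hr⟩
      · rw [hlv]; simp [hsz]
      · show combine ag x = agg (leavesSeg (uSeg l i x) ++ leavesSeg rt)
        have : leavesSeg (uSeg l i x) ++ leavesSeg rt
            = (leavesSeg l ++ leavesSeg rt).set i
                (combine ((leavesSeg l ++ leavesSeg rt).getD i (0, 0)) x) := by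
          rw [hlv, List.set_append, if_pos (by omega)]
          congr 2
          rw [List.getD_eq_getElem _ _ (by omega), List.getD_eq_getElem _ _ hlen,
              List.getElem_append_left (by omega)]
        rw [this, agg_set _ i x hlen hgall hx, hag]
    · have huf : uSeg (Seg.node sz ag l rt) i x
          = Seg.node sz (combine ag x) l (uSeg rt (i - segSize l) x) := by
        conv_lhs => rw [uSeg]
        rw [if_neg hc]
      have hi' : i - segSize l < (leavesSeg rt).length := by
        simp [leavesSeg] at hi; omega
      obtain ⟨hlv, hwf⟩ := ihr hr (i - segSize l) x hx hi'
      have hset : leavesSeg l ++ leavesSeg (uSeg rt (i - segSize l) x)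
          = (leavesSeg l ++ leavesSeg rt).set i
              (combine ((leavesSeg l ++ leavesSeg rt).getD i (0, 0)) x) := by
        rw [List.set_append, if_neg (by omega), hlv, hk]
        congr 3
        rw [List.getD_eq_getElem _ _ (by omega), List.getD_eq_getElem _ _ hlen,
            List.getElem_append_right (by omega)]
      refine ⟨by rw [huf]; exact hset, ?_⟩
      rw [huf]
      refine ⟨?_, ?_, hl, hwf⟩
      · rw [hlv]; simp [hsz, hk]
      · show combine ag x = agg (leavesSeg l ++ leavesSeg (uSeg rt (i - segSize l) x))
        rw [hset, agg_set _ i x hlen hgall hx, hag]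

lemma mkSeg_spec : ∀ (n : Nat), 1 ≤ n →
    leavesSeg (mkSeg n) = List.replicate n ((0 : Int), (0 : Int)) ∧ WFSeg (mkSeg n) := by
  intro n
  induction n using Nat.strong_induction_on with
  | _ n ih =>
    intro hn
    match n, hn with
    | 1, _ =>
      have h1 : mkSeg 1 = Seg.leaf (0, 0) := by rw [mkSeg]
      constructor
      · rw [h1]; rfl
      · rw [h1]; exact Or.inl rfl
    | (n + 2), _ =>
      have h2 : (1 : Nat) ≤ (n + 2) / 2 := by omega
      have h3 : (1 : Nat) ≤ (n + 2) - (n + 2) / 2 := by omega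
      obtain ⟨hl1, hw1⟩ := ih ((n + 2) / 2) (by omega) h2
      obtain ⟨hl2, hw2⟩ := ih ((n + 2) - (n + 2) / 2) (by omega) h3
      have hmk : mkSeg (n + 2)
          = Seg.node (n + 2) (0, 0) (mkSeg ((n + 2) / 2)) (mkSeg ((n + 2) - (n + 2) / 2)) := by
        rw [mkSeg]
      have hlv : leavesSeg (mkSeg (n + 2)) = List.replicate (n + 2) ((0 : Int), (0 : Int)) := by
        rw [hmk]
        show leavesSeg (mkSeg ((n + 2) / 2)) ++ leavesSeg (mkSeg ((n + 2) - (n + 2) / 2)) = _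
        rw [hl1, hl2, ← List.replicate_add]
        congr 1
        omega
      refine ⟨hlv, ?_⟩
      rw [hmk]
      refine ⟨by rw [hl1, hl2]; simp; omega, ?_, hw1, hw2⟩
      show (0, 0) = agg _
      rw [← leavesSeg, ← hmk, hlv, agg_replicate]

-- ---- coordinate compression: sorted(set(arr)) and the rank dictionary ----
def valsOf (arr : List Int) : List Int :=
  PySem.List.sorted (PySem.Set.ofList arr) (fun v => v) false

def rkF (arr : List Int) (y : Int) : Nat := (valsOf arr).idxOf y

lemma valsOf_pairwise (arr : List Int) : (valsOf arr).Pairwise (· < ·) :=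
  PySem.List.sorted_ofList_pairwise_lt arr

lemma mem_valsOf' (arr : List Int) (y : Int) : y ∈ valsOf arr ↔ y ∈ arr := by
  simp [valsOf, PySem.List.mem_sorted, PySem.Set.mem_ofList]

lemma valsOf_nodup (arr : List Int) : (valsOf arr).Nodup :=
  (valsOf_pairwise arr).imp (fun h => ne_of_lt h)

lemma rkF_lt_iff (arr : List Int) {x y : Int} (hx : x ∈ valsOf arr) (hy : y ∈ valsOf arr) :
    rkF arr y < rkF arr x ↔ y < x := by
  have hpx := List.idxOf_lt_length_of_mem hx
  have hpy := List.idxOf_lt_length_of_mem hy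
  have hgx : (valsOf arr)[(valsOf arr).idxOf x] = x := List.getElem_idxOf hpx
  have hgy : (valsOf arr)[(valsOf arr).idxOf y] = y := List.getElem_idxOf hpy
  have hpw := List.pairwise_iff_getElem.mp (valsOf_pairwise arr)
  constructor
  · intro h
    have := hpw _ _ hpy hpx h
    rwa [hgx, hgy] at this
  · intro h
    rcases lt_trichotomy ((valsOf arr).idxOf y) ((valsOf arr).idxOf x) with h' | h' | h'
    · exact h'
    · exfalso
      have heq := hgy
      simp only [h'] at heq
      rw [hgx] at heq
      omega
    · exfalso
      have := hpw _ _ hpx hpy h'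
      rw [hgx, hgy] at this
      omega

lemma dict_untouched (x : Int) : ∀ (l : List (Int × Int)) (d : PySem.Dict Int Int),
    (∀ q ∈ l, q.2 ≠ x) →
    (l.foldl (fun d p => d.insert p.2 p.1) d).get? x = d.get? x := by
  intro l
  induction l with
  | nil => intro d _; rfl
  | cons q t ih =>
    intro d hl
    simp only [List.foldl_cons]
    rw [ih _ (fun r hr => hl r (by simp [hr]))]
    exact PySem.Dict.get?_insert_of_ne _ _ (fun h => hl q (by simp) h.symm) |>.symm ▸ rfl

lemma rank_get : ∀ (v : List Int), v.Nodup → ∀ x ∈ v, ∀ (s : Int) (d : PySem.Dict Int Int),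
    ((PySem.List.enumerate v s).foldl (fun d p => d.insert p.2 p.1) d).get? x
      = some (s + (v.idxOf x : Int)) := by
  intro v
  induction v with
  | nil => intro _ x hx; simp at hx
  | cons a t ih =>
    intro hnd x hx s d
    rw [PySem.List.enumerate_cons]
    simp only [List.foldl_cons]
    rcases List.mem_cons.mp hx with rfl | hxt
    · have hat : x ∉ t := (List.nodup_cons.mp hnd).1
      rw [dict_untouched x _ _ (by
        intro q hq
        rcases (PySem.List.mem_enumerate_iff _ _ _).mp hq with ⟨k, hk, rfl⟩
        intro h
        exact hat (h ▸ List.getElem_mem hk))]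
      rw [PySem.Dict.get?_insert_self]
      simp [List.idxOf_cons_self]
    · have hax : a ≠ x := by
        rintro rfl
        exact (List.nodup_cons.mp hnd).1 hxt
      rw [ih (List.nodup_cons.mp hnd).2 x hxt (s + 1) _]
      rw [List.idxOf_cons_ne _ hax]
      congr 1
      push_cast
      omega

-- ---- partitioning a list by rank: per-rank buckets concatenate (up to permutation)
--      to the filter over all smaller ranks ----
lemma filter_lt_succ_perm {α : Type} (f : α → Nat) (r : Nat) : ∀ (l : List α),
    (l.filter (fun t => decide (f t < r)) ++ l.filter (fun t => decide (f t = r))).Perm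
      (l.filter (fun t => decide (f t < r + 1))) := by
  intro l
  induction l with
  | nil => simp
  | cons a t ih =>
    by_cases h1 : f a < r
    · simp only [List.filter_cons, decide_eq_true_eq]
      rw [if_pos (by omega), if_neg (by omega), if_pos (by omega)]
      exact List.Perm.cons a ih
    · by_cases h2 : f a = r
      · simp only [List.filter_cons, decide_eq_true_eq]
        rw [if_neg (by omega), if_pos (by omega), if_pos (by omega)]
        exact (List.perm_middle).trans (List.Perm.cons a ih)
      · simp only [List.filter_cons, decide_eq_true_eq]
        rw [if_neg (by omega), if_neg (by omega), if_neg (by omega)]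
        exact ih

lemma partition_perm {α : Type} (f : α → Nat) : ∀ (r : Nat) (l : List α),
    ((List.range r).flatMap (fun ρ => l.filter (fun t => decide (f t = ρ)))).Perm
      (l.filter (fun t => decide (f t < r))) := by
  intro r
  induction r with
  | zero => intro l; simp
  | succ k ih =>
    intro l
    rw [List.range_succ, List.flatMap_append]
    have h1 : ([k].flatMap (fun ρ => l.filter (fun t => decide (f t = ρ))))
        = l.filter (fun t => decide (f t = k)) := by simp
    rw [h1]
    exact ((ih l).append_right _).trans (filter_lt_succ_perm f k l)

-- ---- the B loop invariant ----
def pairsAt (arr p : List Int) (ρ : Nat) : List (Int × Int) :=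
  ((buildSpec p).filter (fun t => decide (rkF arr t.1 = ρ))).map (·.2)

def tableOf (arr p : List Int) : List (Int × Int) :=
  (List.range (valsOf arr).length).map (fun ρ => agg (pairsAt arr p ρ))

def stepB (arr : List Int) (st : Seg × (Int × Int) × Int) (x : Int) : Seg × (Int × Int) × Int :=
  (uSeg st.1 (rkF arr x) ((qSeg st.1 (rkF arr x)).1 + 1, (qSeg st.1 (rkF arr x)).2 + x),
   combine st.2.1 ((qSeg st.1 (rkF arr x)).1 + 1, (qSeg st.1 (rkF arr x)).2 + x),
   st.2.2 + x)

lemma pairsAt_good (arr p : List Int) (ρ : Nat) : ∀ q ∈ pairsAt arr p ρ, goodP q := by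
  intro q hq
  rcases List.mem_map.mp hq with ⟨t, ht, rfl⟩
  exact Or.inr (buildSpec_good p t (List.mem_of_mem_filter ht))

lemma length_tableOf (arr p : List Int) : (tableOf arr p).length = (valsOf arr).length := by
  simp [tableOf]

lemma getElem_tableOf (arr p : List Int) (j : Nat) (hj : j < (valsOf arr).length) :
    (tableOf arr p)[j]'(by rw [length_tableOf]; exact hj) = agg (pairsAt arr p j) := by
  simp [tableOf]

lemma query_val (arr p : List Int) (x : Int) (hx : x ∈ valsOf arr)
    (hp : ∀ y ∈ p, y ∈ valsOf arr) (t : Seg)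
    (hlv : leavesSeg t = tableOf arr p) (hw : WFSeg t) :
    qSeg t (rkF arr x) = (buildSpec p).foldl (cstep x) (0, 0) := by
  have hr : rkF arr x < (valsOf arr).length := List.idxOf_lt_length_of_mem hx
  rw [qSeg_eq t hw, hlv]
  have h1 : (tableOf arr p).take (rkF arr x)
      = (List.range (rkF arr x)).map (fun ρ => agg (pairsAt arr p ρ)) := by
    rw [tableOf, ← List.map_take, List.take_range, Nat.min_eq_left (le_of_lt hr)]
  rw [h1]
  have h2 : (List.range (rkF arr x)).map (fun ρ => agg (pairsAt arr p ρ))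
      = ((List.range (rkF arr x)).map (pairsAt arr p)).map agg := by
    rw [List.map_map]; rfl
  rw [h2, agg_maps_flatten _ (by
    intro l hl
    rcases List.mem_map.mp hl with ⟨ρ, _, rfl⟩
    exact pairsAt_good arr p ρ)]
  rw [← List.flatMap_def]
  have h3 : (List.range (rkF arr x)).flatMap (pairsAt arr p)
      = ((List.range (rkF arr x)).flatMap
          (fun ρ => (buildSpec p).filter (fun t => decide (rkF arr t.1 = ρ)))).map (·.2) := by
    rw [List.map_flatMap]; rfl
  rw [h3]
  have h4 := (partition_perm (fun t => rkF arr t.1) (rkF arr x) (buildSpec p)).map (·.2)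
  rw [agg_perm h4]
  have h5 : (buildSpec p).filter (fun t => decide (rkF arr t.1 < rkF arr x))
      = (buildSpec p).filter (fun t => decide (t.1 < x)) := by
    apply List.filter_congr
    intro t ht
    have ht1 : t.1 ∈ p := by
      have := List.mem_map_of_mem (f := (·.1)) ht
      rwa [buildSpec_fst] at this
    simp only [decide_eq_decide]
    exact rkF_lt_iff arr hx (hp t.1 ht1)
  rw [h5, cstep_fold x (buildSpec p) (0, 0)]
  rfl

lemma table_step (arr p : List Int) (x : Int) (hx : x ∈ valsOf arr) :
    tableOf arr (p ++ [x])
      = (tableOf arr p).set (rkF arr x)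
          (combine ((tableOf arr p).getD (rkF arr x) (0, 0)) (bSpec x (buildSpec p))) := by
  have hr : rkF arr x < (valsOf arr).length := List.idxOf_lt_length_of_mem hx
  apply List.ext_getElem
  · simp [length_tableOf]
  · intro j hj hj'
    have hjm : j < (valsOf arr).length := by
      rw [length_tableOf] at hj; exact hj
    rw [List.getElem_set]
    have hLHS : (tableOf arr (p ++ [x]))[j]'hj = agg (pairsAt arr (p ++ [x]) j) :=
      getElem_tableOf arr (p ++ [x]) j hjm
    have hpairs : pairsAt arr (p ++ [x]) j
        = pairsAt arr p j ++ (if rkF arr x = j then [bSpec x (buildSpec p)] else []) := by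
      unfold pairsAt
      rw [buildSpec_append, List.filter_append, List.map_append]
      congr 1
      by_cases hc : rkF arr x = j
      · rw [if_pos hc]; simp [hc]
      · rw [if_neg hc]; simp [hc]
    rw [hLHS, hpairs]
    by_cases hc : rkF arr x = j
    · rw [if_pos hc, if_pos hc, agg_append_singleton]
      congr 1
      rw [List.getD_eq_getElem _ _ (by rw [length_tableOf]; omega)]
      have := getElem_tableOf arr p (rkF arr x) (by omega)
      subst hc
      rw [this]
    · rw [if_neg hc, if_neg hc, List.append_nil]
      exact (getElem_tableOf arr p j hjm).symm

lemma B_loop (arr : List Int) : ∀ (rest p : List Int),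
    (∀ y ∈ rest, y ∈ valsOf arr) → (∀ y ∈ p, y ∈ valsOf arr) →
    ∀ (t : Seg) (b : Int × Int) (tot : Int),
    leavesSeg t = tableOf arr p → WFSeg t →
    b = agg ((buildSpec p).map (·.2)) → tot = p.sum →
    ((rest.foldl (stepB arr) (t, b, tot)).2.1 = agg ((buildSpec (p ++ rest)).map (·.2)) ∧
     (rest.foldl (stepB arr) (t, b, tot)).2.2 = (p ++ rest).sum) := by
  intro rest
  induction rest with
  | nil =>
    intro p _ _ t b tot _ _ hb htot
    simpa using ⟨hb, htot⟩
  | cons x rest' ih =>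
    intro p hrest hp t b tot hlv hw hb htot
    have hx : x ∈ valsOf arr := hrest x (by simp)
    have hr : rkF arr x < (valsOf arr).length := List.idxOf_lt_length_of_mem hx
    have hq : qSeg t (rkF arr x) = (buildSpec p).foldl (cstep x) (0, 0) :=
      query_val arr p x hx hp t hlv hw
    have hcur : ((qSeg t (rkF arr x)).1 + 1, (qSeg t (rkF arr x)).2 + x)
        = bSpec x (buildSpec p) := by
      rw [hq]; rfl
    have hcg : goodP (bSpec x (buildSpec p)) := by
      have := buildSpec_good (p ++ [x]) (x, bSpec x (buildSpec p)) (by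
        rw [buildSpec_append]; simp)
      exact Or.inr this
    have hlen : rkF arr x < (leavesSeg t).length := by
      rw [hlv, length_tableOf]; exact hr
    obtain ⟨hlv', hw'⟩ := uSeg_spec t hw (rkF arr x) (bSpec x (buildSpec p)) hcg hlen
    simp only [List.foldl_cons]
    have hstep : stepB arr (t, b, tot) x
        = (uSeg t (rkF arr x) (bSpec x (buildSpec p)),
           combine b (bSpec x (buildSpec p)), tot + x) := by
      simp only [stepB, hcur]
    rw [hstep]
    have hnewlv : leavesSeg (uSeg t (rkF arr x) (bSpec x (buildSpec p)))
        = tableOf arr (p ++ [x]) := by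
      rw [hlv', hlv, table_step arr p x hx]
    have hnewb : combine b (bSpec x (buildSpec p))
        = agg ((buildSpec (p ++ [x])).map (·.2)) := by
      rw [hb, buildSpec_append, List.map_append, ← agg_append_singleton]
      rfl
    have hpx : ∀ y ∈ p ++ [x], y ∈ valsOf arr := by
      intro y hy
      rcases List.mem_append.mp hy with h | h
      · exact hp y h
      · have : y = x := by simpa using h
        subst this; exact hx
    have := ih (p ++ [x]) (fun y hy => hrest y (by simp [hy])) hpx
      (uSeg t (rkF arr x) (bSpec x (buildSpec p)))
      (combine b (bSpec x (buildSpec p))) (tot + x)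
      hnewlv hw' hnewb (by rw [htot]; simp)
    rw [List.append_assoc] at this
    simpa using this

-- ---- final assembly: both ports return sum(arr) - (min sum of a maximum-length LIS) ----
lemma A_val (arr : List Int) (h : arr ≠ []) :
    nonLisMaxSum arr = arr.sum - (agg ((buildSpec arr).map (·.2))).2 := by
  have hbne : buildSpec arr ≠ [] := by
    intro hc
    apply h
    have hf := buildSpec_fst arr
    rw [hc] at hf
    simpa using hf.symm
  have hpsne : (buildSpec arr).map (·.2) ≠ [] := by
    simpa using hbne
  have hgood : ∀ p ∈ (buildSpec arr).map (·.2), 1 ≤ p.1 := by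
    intro p hp
    rcases List.mem_map.mp hp with ⟨t, ht, rfl⟩
    exact buildSpec_good arr t ht
  obtain ⟨_, hmax, hmin⟩ := A_agg _ hpsne hgood
  have hlens : (dpA arr).map (fun p => p.2.2) = ((buildSpec arr).map (·.2)).map (·.1) := by
    rw [dpA_eq]
    simp [List.map_map, conv3]
  have hfold : ∀ (M : Int),
      (dpA arr).foldl (fun (acc : Option Int) p =>
        if p.2.2 = M then
          some (match acc with | none => p.2.1 | some s => min s p.2.1)
        else acc) none = minAt ((buildSpec arr).map (·.2)) M := by
    intro M
    rw [dpA_eq, List.foldl_map, minAt, List.foldl_map]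
    simp only [conv3]
  simp only [nonLisMaxSum]
  rw [hlens, hmax]
  dsimp only
  rw [hfold, hmin]

lemma B_val (arr : List Int) (h : arr ≠ []) :
    nonLisMaxSum_alt arr = arr.sum - (agg ((buildSpec arr).map (·.2))).2 := by
  have hm1 : 1 ≤ (valsOf arr).length := by
    obtain ⟨x, t, rfl⟩ := List.exists_cons_of_ne_nil h
    have hx : x ∈ valsOf (x :: t) := (mem_valsOf' _ _).mpr (by simp)
    have := List.length_pos_of_mem hx
    omega
  obtain ⟨hlv0, hwf0⟩ := mkSeg_spec (valsOf arr).length hm1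
  have htab : tableOf arr [] = List.replicate (valsOf arr).length ((0 : Int), (0 : Int)) := by
    unfold tableOf pairsAt
    have hb0 : buildSpec [] = [] := rfl
    simp [hb0, agg, List.map_const']
  simp only [nonLisMaxSum_alt, if_neg h]
  have hval : PySem.List.sorted (PySem.Set.ofList arr) (fun v => v) false = valsOf arr := rfl
  rw [hval]
  have hcong : ∀ x ∈ arr, ∀ (st : Seg × (Int × Int) × Int),
      (uSeg st.1 ((((PySem.List.enumerate (valsOf arr) 0).foldl
            (fun (d : PySem.Dict Int Int) (p : Int × Int) => d.insert p.2 p.1)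
            PySem.Dict.empty).get? x).getD 0).toNat
          ((qSeg st.1 ((((PySem.List.enumerate (valsOf arr) 0).foldl
              (fun (d : PySem.Dict Int Int) (p : Int × Int) => d.insert p.2 p.1)
              PySem.Dict.empty).get? x).getD 0).toNat).1 + 1,
           (qSeg st.1 ((((PySem.List.enumerate (valsOf arr) 0).foldl
              (fun (d : PySem.Dict Int Int) (p : Int × Int) => d.insert p.2 p.1)
              PySem.Dict.empty).get? x).getD 0).toNat).2 + x),
       combine st.2.1
          ((qSeg st.1 ((((PySem.List.enumerate (valsOf arr) 0).foldl
              (fun (d : PySem.Dict Int Int) (p : Int × Int) => d.insert p.2 p.1)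
              PySem.Dict.empty).get? x).getD 0).toNat).1 + 1,
           (qSeg st.1 ((((PySem.List.enumerate (valsOf arr) 0).foldl
              (fun (d : PySem.Dict Int Int) (p : Int × Int) => d.insert p.2 p.1)
              PySem.Dict.empty).get? x).getD 0).toNat).2 + x),
       st.2.2 + x) = stepB arr st x := by
    intro x hx st
    have hxv : x ∈ valsOf arr := (mem_valsOf' arr x).mpr hx
    have hget := rank_get (valsOf arr) (valsOf_nodup arr) x hxv 0 PySem.Dict.empty
    rw [hget]
    simp only [Option.getD_some, zero_add, Int.toNat_natCast, stepB, rkF]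
  rw [PySem.List.foldl_congr_mem' arr _ (stepB arr) _ hcong]
  obtain ⟨hb, ht⟩ := B_loop arr arr []
    (fun y hy => (mem_valsOf' arr y).mpr hy) (by simp)
    (mkSeg (valsOf arr).length) (0, 0) 0
    (hlv0.trans htab.symm) hwf0 rfl rfl
  simp only [List.nil_append] at hb ht
  rw [hb, ht]

-- ===== VERDICT (by name: the statement is the Claim_ definition above) =====
theorem nonLisMaxSum_spec : Claim_equal_nonLisMaxSum := by
  intro arr _ hpre
  unfold Spec_nonLisMaxSum
  rw [A_val arr hpre, B_val arr hpre]
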